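-- pv_equiv track=rewrite | github.com/netra-systems/zen | tests/unit/test_execution_engine_regression_prevention_1146.py | _extract_method_body
-- ===== SOURCE A (Python) =====
-- from typing import Dict, List, Set, Tuple, Any
--
-- def _extract_method_body(lines: List[str], start_line: int) -> List[str]:
--     """Extract method body for analysis."""
--     method_lines = []
--     indent_level = None
--
--     for i in range(start_line, min(start_line + 20, len(lines))):
--         line = lines[i]
--         if not line.strip():
--             continue
--
--         current_indent = len(line) - len(line.lstrip())
--
--         if indent_level is None and line.strip().startswith('def '):
--             indent_level = current_indent
--             method_lines.append(line)
--         elif indent_level is not None: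
--             if current_indent > indent_level or line.strip().startswith(('"""', "'''")):
--                 method_lines.append(line)
--             else:
--                 break
--
--     return method_lines
-- ===== SOURCE B (Python) =====
-- from typing import List
--
-- def _extract_method_body(lines: List[str], start_line: int) -> List[str]:
--     """Extract method body for analysis (three small passes instead of a state machine)."""
--     end = min(start_line + 20, len(lines))
--
--     # pass 1: find the def header inside the window
--     def_idx = None
--     for i in range(start_line, end):
--         if lines[i].strip().startswith('def '):
--             def_idx = i
--             break
--     if def_idx is None:
--         return []
--
--     header = lines[def_idx]
--     indent = len(header) - len(header.lstrip())
--
--     def belongs(line: str) -> bool: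
--         s = line.strip()
--         return (not s) or len(line) - len(line.lstrip()) > indent \
--             or s.startswith(('"""', "'''"))
--
--     # pass 2: find where the body stops
--     stop = end
--     for i in range(def_idx + 1, end):
--         if not belongs(lines[i]):
--             stop = i
--             break
--
--     # pass 3: collect the non-blank body lines
--     return [header] + [lines[i] for i in range(def_idx + 1, stop)
--                        if lines[i].strip()]
-- ===== Notes on version B (the rewrite author's own statement) =====
-- stated objective: simpler
-- what changed: A's single state-machine loop (Optional indent_level threaded through one pass with continue/break) is replaced by three small passes: find the def header in the window, find the index where the body stops, then collect the non-blank lines of that range with a comprehension.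
import Mathlib
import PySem

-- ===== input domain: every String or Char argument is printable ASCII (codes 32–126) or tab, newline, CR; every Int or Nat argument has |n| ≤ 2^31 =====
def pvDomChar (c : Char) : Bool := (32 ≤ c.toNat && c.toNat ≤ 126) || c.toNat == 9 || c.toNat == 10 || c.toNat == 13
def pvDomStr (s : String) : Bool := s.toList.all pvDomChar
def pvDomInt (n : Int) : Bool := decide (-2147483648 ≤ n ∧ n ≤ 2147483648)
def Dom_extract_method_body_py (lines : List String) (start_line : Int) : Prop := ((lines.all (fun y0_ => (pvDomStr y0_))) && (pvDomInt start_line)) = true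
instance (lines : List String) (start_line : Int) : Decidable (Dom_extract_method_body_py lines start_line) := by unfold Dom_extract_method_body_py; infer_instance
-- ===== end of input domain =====

-- B replaces A's single state-machine loop by three small passes (find the def header,
-- find where the body stops, collect the non-blank lines) — simpler decomposition, same cost.


-- ===== PORT A =====
-- A's single loop: state = (accumulated method lines, optional indent_level), with
-- continue on blank lines and break out of the loop in the final else branch.
def pvALoop (lines : List String) (idxs : List Int) (acc : List String) (ind : Option Int) : List String :=
  match idxs with
  | [] => acc
  | i :: rest =>
    let line := PySem.List.pyGetD lines i ""
    if PySem.Str.strip line == "" then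
      pvALoop lines rest acc ind
    else
      let cur : Int := PySem.Str.len line - PySem.Str.len (PySem.Str.lstrip line)
      match ind with
      | none =>
        if PySem.Str.startswith (PySem.Str.strip line) "def " then
          pvALoop lines rest (acc ++ [line]) (some cur)
        else
          pvALoop lines rest acc none
      | some lvl =>
        if cur > lvl || PySem.Str.startswith (PySem.Str.strip line) "\"\"\"" || PySem.Str.startswith (PySem.Str.strip line) "'''" then
          pvALoop lines rest (acc ++ [line]) (some lvl)
        else
          acc

def extract_method_body_py (lines : List String) (start_line : Int) : List String :=
  pvALoop lines (PySem.List.pyRange start_line (min (start_line + 20) (lines.length : Int)) 1) [] none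

-- ===== PORT B =====
-- pass 1: index of the first line in the window whose stripped text starts with 'def '
def pvFindDef (lines : List String) (idxs : List Int) : Option Int :=
  match idxs with
  | [] => none
  | i :: rest =>
    if PySem.Str.startswith (PySem.Str.strip (PySem.List.pyGetD lines i "")) "def " then some i
    else pvFindDef lines rest

def pvBelongs (indent : Int) (line : String) : Bool :=
  PySem.Str.strip line == "" ||
  (PySem.Str.len line - PySem.Str.len (PySem.Str.lstrip line) > indent ||
   PySem.Str.startswith (PySem.Str.strip line) "\"\"\"" ||
   PySem.Str.startswith (PySem.Str.strip line) "'''")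

-- pass 2: first index whose line does not belong to the body (default: window end)
def pvFindStop (lines : List String) (idxs : List Int) (indent : Int) (dflt : Int) : Int :=
  match idxs with
  | [] => dflt
  | i :: rest =>
    if !pvBelongs indent (PySem.List.pyGetD lines i "") then i
    else pvFindStop lines rest indent dflt

def extract_method_body_py_alt (lines : List String) (start_line : Int) : List String :=
  let e := min (start_line + 20) (lines.length : Int)
  match pvFindDef lines (PySem.List.pyRange start_line e 1) with
  | none => []
  | some j =>
    let header := PySem.List.pyGetD lines j ""
    let indent := PySem.Str.len header - PySem.Str.len (PySem.Str.lstrip header)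
    let stop := pvFindStop lines (PySem.List.pyRange (j + 1) e 1) indent e
    -- pass 3: comprehension keeping non-blank lines of range(j+1, stop)
    header :: (PySem.List.pyRange (j + 1) stop 1).filterMap (fun i =>
      let l := PySem.List.pyGetD lines i ""
      if PySem.Str.strip l == "" then none else some l)

-- ===== PRECONDITION & SPEC =====
-- Pre_ excludes exactly the inputs where Python A raises IndexError: a negative
-- start_line reaching past the front of lines (lines[i] with i < -len(lines)).
def Pre_extract_method_body_py (lines : List String) (start_line : Int) : Prop :=
  -(lines.length : Int) ≤ start_line
instance (lines : List String) (start_line : Int) : Decidable (Pre_extract_method_body_py lines start_line) := by unfold Pre_extract_method_body_py; infer_instance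

def pvWitness_extract_method_body_py : List String × Int := (["def f():", "    x = 1", "", "    y = 2", "z = 3"], 0)

def Spec_extract_method_body_py (lines : List String) (start_line : Int) (out : List String) : Prop := out = extract_method_body_py_alt lines start_line
instance (lines : List String) (start_line : Int) (out : List String) : Decidable (Spec_extract_method_body_py lines start_line out) := by unfold Spec_extract_method_body_py; infer_instance

-- ===== CLAIM (what is proved, stated in full; the proofs are below) =====
def Claim_equal_extract_method_body_py : Prop := ∀ (lines : List String) (start_line : Int), Dom_extract_method_body_py lines start_line → Pre_extract_method_body_py lines start_line → Spec_extract_method_body_py lines start_line (extract_method_body_py lines start_line)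

-- ===== LEMMAS AND PROOFS =====

-- a line whose stripped text starts with "def " is not blank
lemma pv_def_not_blank (l : String) (h : PySem.Str.startswith (PySem.Str.strip l) "def " = true) :
    (PySem.Str.strip l == "") = false := by
  rcases eq_or_ne (PySem.Str.strip l) "" with hb | hb
  · rw [hb] at h; exact absurd h (by decide)
  · simp [hb]

-- the stop index returned by pass 2 is ≥ the window start
lemma pv_stop_lb (lines : List String) (e indent : Int) : ∀ (n : Nat) (a : Int), (e - a).toNat = n → a ≤ e →
    a ≤ pvFindStop lines (PySem.List.pyRange a e 1) indent e := by
  intro n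
  induction n with
  | zero =>
    intro a hn ha
    have he : e = a := by omega
    rw [he, PySem.List.pyRange_one_eq_nil le_rfl]
    simp [pvFindStop]
  | succ k ih =>
    intro a hn ha
    have hlt : a < e := by omega
    rw [PySem.List.pyRange_one_cons hlt]
    simp only [pvFindStop]
    split
    · exact le_rfl
    · have := ih (a + 1) (by omega) (by omega)
      omega

-- A's loop in the some-state equals pass 2 + pass 3
lemma pv_A_some (lines : List String) (e : Int) : ∀ (n : Nat) (a : Int), (e - a).toNat = n → ∀ (lvl : Int) (acc : List String),
    pvALoop lines (PySem.List.pyRange a e 1) acc (some lvl) =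
      acc ++ (PySem.List.pyRange a (pvFindStop lines (PySem.List.pyRange a e 1) lvl e) 1).filterMap (fun i =>
        let l := PySem.List.pyGetD lines i ""
        if PySem.Str.strip l == "" then none else some l) := by
  intro n
  induction n with
  | zero =>
    intro a hn lvl acc
    have hle : e ≤ a := by omega
    rw [PySem.List.pyRange_one_eq_nil hle]
    simp [pvALoop, pvFindStop, PySem.List.pyRange_one_eq_nil hle]
  | succ k ih =>
    intro a hn lvl acc
    have hlt : a < e := by omega
    rw [PySem.List.pyRange_one_cons hlt]
    simp only [pvALoop, pvFindStop]
    by_cases hb : (PySem.Str.strip (PySem.List.pyGetD lines a "") == "") = true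
    · -- blank line: skipped by A, belongs for pass 2, filtered out in pass 3
      have hbel : pvBelongs lvl (PySem.List.pyGetD lines a "") = true := by
        simp only [pvBelongs, hb, Bool.true_or]
      rw [if_pos hb, if_neg (by simp [hbel])]
      rw [ih (a + 1) (by omega) lvl acc]
      have hs := pv_stop_lb lines e lvl k (a + 1) (by omega) (by omega)
      rw [PySem.List.pyRange_one_cons (show a < pvFindStop lines (PySem.List.pyRange (a+1) e 1) lvl e by omega)]
      have hb' : PySem.Str.strip (PySem.List.pyGetD lines a "") = "" := by simpa using hb
      simp [hb']
    · have hb0 : (PySem.Str.strip (PySem.List.pyGetD lines a "") == "") = false :=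
        Bool.eq_false_iff.mpr hb
      -- with the blank disjunct false, belonging is exactly A's body condition
      have hbel : pvBelongs lvl (PySem.List.pyGetD lines a "") =
          (decide (PySem.Str.len (PySem.List.pyGetD lines a "") - PySem.Str.len (PySem.Str.lstrip (PySem.List.pyGetD lines a "")) > lvl) ||
           PySem.Str.startswith (PySem.Str.strip (PySem.List.pyGetD lines a "")) "\"\"\"" ||
           PySem.Str.startswith (PySem.Str.strip (PySem.List.pyGetD lines a "")) "'''") := by
        simp only [pvBelongs, hb0, Bool.false_or]
      by_cases hc : (decide (PySem.Str.len (PySem.List.pyGetD lines a "") - PySem.Str.len (PySem.Str.lstrip (PySem.List.pyGetD lines a "")) > lvl) ||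
           PySem.Str.startswith (PySem.Str.strip (PySem.List.pyGetD lines a "")) "\"\"\"" ||
           PySem.Str.startswith (PySem.Str.strip (PySem.List.pyGetD lines a "")) "'''") = true
      · -- body line: appended by A, belongs for pass 2, kept in pass 3
        rw [if_neg hb, if_pos hc, if_neg (by rw [hbel, hc]; decide)]
        rw [ih (a + 1) (by omega) lvl (acc ++ [PySem.List.pyGetD lines a ""])]
        have hs := pv_stop_lb lines e lvl k (a + 1) (by omega) (by omega)
        rw [PySem.List.pyRange_one_cons (show a < pvFindStop lines (PySem.List.pyRange (a+1) e 1) lvl e by omega)]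
        have hb' : ¬ PySem.Str.strip (PySem.List.pyGetD lines a "") = "" := by simpa using hb
        simp [hb']
      · -- first non-body line: A breaks, pass 2 stops at a, pass 3 range is empty
        have hc0 := Bool.eq_false_iff.mpr hc
        rw [if_neg hb, if_neg hc, if_pos (by rw [hbel, hc0]; decide)]
        rw [PySem.List.pyRange_one_eq_nil le_rfl]
        simp

-- A's loop in the none-state: if pass 1 finds no def header, A returns the accumulator
lemma pv_A_none_none (lines : List String) (e : Int) : ∀ (n : Nat) (a : Int), (e - a).toNat = n → ∀ (acc : List String),
    pvFindDef lines (PySem.List.pyRange a e 1) = none →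
    pvALoop lines (PySem.List.pyRange a e 1) acc none = acc := by
  intro n
  induction n with
  | zero =>
    intro a hn acc _
    rw [PySem.List.pyRange_one_eq_nil (by omega)]
    simp [pvALoop]
  | succ k ih =>
    intro a hn acc hf
    have hlt : a < e := by omega
    rw [PySem.List.pyRange_one_cons hlt] at hf ⊢
    simp only [pvFindDef] at hf
    simp only [pvALoop]
    by_cases hd : PySem.Str.startswith (PySem.Str.strip (PySem.List.pyGetD lines a "")) "def " = true
    · rw [if_pos hd] at hf; exact absurd hf (by simp)
    · rw [if_neg hd] at hf
      rw [if_neg hd]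
      by_cases hb : (PySem.Str.strip (PySem.List.pyGetD lines a "") == "") = true
      · rw [if_pos hb]
        exact ih (a + 1) (by omega) acc hf
      · rw [if_neg hb]
        exact ih (a + 1) (by omega) acc hf

-- A's loop in the none-state: pass 1 finds the def header A appends first
lemma pv_A_none_some (lines : List String) (e : Int) : ∀ (n : Nat) (a : Int), (e - a).toNat = n → ∀ (acc : List String) (j : Int),
    pvFindDef lines (PySem.List.pyRange a e 1) = some j →
    pvALoop lines (PySem.List.pyRange a e 1) acc none =
      pvALoop lines (PySem.List.pyRange (j + 1) e 1)
        (acc ++ [PySem.List.pyGetD lines j ""])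
        (some (PySem.Str.len (PySem.List.pyGetD lines j "") - PySem.Str.len (PySem.Str.lstrip (PySem.List.pyGetD lines j "")))) := by
  intro n
  induction n with
  | zero =>
    intro a hn acc j hf
    rw [PySem.List.pyRange_one_eq_nil (by omega)] at hf
    exact absurd hf (by simp [pvFindDef])
  | succ k ih =>
    intro a hn acc j hf
    have hlt : a < e := by omega
    rw [PySem.List.pyRange_one_cons hlt] at hf ⊢
    simp only [pvFindDef] at hf
    simp only [pvALoop]
    by_cases hd : PySem.Str.startswith (PySem.Str.strip (PySem.List.pyGetD lines a "")) "def " = true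
    · rw [if_pos hd] at hf
      have hj : j = a := by cases hf; rfl
      subst hj
      rw [if_neg (by rw [pv_def_not_blank _ hd]; decide), if_pos hd]
    · rw [if_neg hd] at hf
      rw [if_neg hd]
      by_cases hb : (PySem.Str.strip (PySem.List.pyGetD lines a "") == "") = true
      · rw [if_pos hb]
        exact ih (a + 1) (by omega) acc j hf
      · rw [if_neg hb]
        exact ih (a + 1) (by omega) acc j hf

-- ===== VERDICT (by name: the statement is the Claim_ definition above) =====
theorem extract_method_body_py_spec : Claim_equal_extract_method_body_py := by
  intro lines start_line _ _
  unfold Spec_extract_method_body_py extract_method_body_py extract_method_body_py_alt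
  dsimp only
  cases hfind : pvFindDef lines (PySem.List.pyRange start_line (min (start_line + 20) (lines.length : Int)) 1) with
  | none =>
    rw [pv_A_none_none lines _ _ start_line rfl [] hfind]
  | some j =>
    rw [pv_A_none_some lines _ _ start_line rfl [] j hfind]
    rw [pv_A_some lines _ _ (j + 1) rfl]
    rfl
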